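-- pv_equiv track=rewrite | github.com/electricitymaps/electricitymaps-contrib | electricitymap/contrib/config/__init__.py | generate_zone_to_exchanges
-- ===== SOURCE A (Python) =====
-- from typing import Any, Dict, List, NewType, Set, Tuple
--
-- def generate_zone_to_exchanges(exhanges: Dict[str, Any]) -> Dict[str, Any]:
--     zone_to_exchanges = {}
--     for k, _ in exhanges.items():
--         zone_key_1, zone_key_2 = k.split("->")
--         if zone_key_1 not in zone_to_exchanges:
--             zone_to_exchanges[zone_key_1] = [k]
--         else:
--             zone_to_exchanges[zone_key_1].append(k)
--         if zone_key_2 not in zone_to_exchanges: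
--             zone_to_exchanges[zone_key_2] = [k]
--         else:
--             zone_to_exchanges[zone_key_2].append(k)
--
--     # we want exchanges to always be in the same order
--     for z, ex in zone_to_exchanges.items():
--         zone_to_exchanges[z] = sorted(ex)
--
--     return zone_to_exchanges
-- ===== SOURCE B (Python) =====
-- def generate_zone_to_exchanges(exhanges):
--     zone_to_exchanges = {}
--     # first pass: create both endpoint zones of every key, in first-appearance order
--     for k in exhanges:
--         zone_key_1, zone_key_2 = k.split("->")
--         zone_to_exchanges[zone_key_1] = []
--         zone_to_exchanges[zone_key_2] = []
--     # second pass over the keys sorted once: appending in this order leaves every per-zone list sorted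
--     for k in sorted(exhanges):
--         zone_key_1, zone_key_2 = k.split("->")
--         zone_to_exchanges[zone_key_1].append(k)
--         zone_to_exchanges[zone_key_2].append(k)
--     return zone_to_exchanges
-- ===== Notes on version B (the rewrite author's own statement) =====
-- stated objective: alternative
-- what changed: Instead of grouping keys per zone and then sorting each zone's list separately, B sorts the key list once and appends each key to its (pre-created) endpoint zones in that global order, so every per-zone list comes out sorted without any per-zone sort.
import Mathlib
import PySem

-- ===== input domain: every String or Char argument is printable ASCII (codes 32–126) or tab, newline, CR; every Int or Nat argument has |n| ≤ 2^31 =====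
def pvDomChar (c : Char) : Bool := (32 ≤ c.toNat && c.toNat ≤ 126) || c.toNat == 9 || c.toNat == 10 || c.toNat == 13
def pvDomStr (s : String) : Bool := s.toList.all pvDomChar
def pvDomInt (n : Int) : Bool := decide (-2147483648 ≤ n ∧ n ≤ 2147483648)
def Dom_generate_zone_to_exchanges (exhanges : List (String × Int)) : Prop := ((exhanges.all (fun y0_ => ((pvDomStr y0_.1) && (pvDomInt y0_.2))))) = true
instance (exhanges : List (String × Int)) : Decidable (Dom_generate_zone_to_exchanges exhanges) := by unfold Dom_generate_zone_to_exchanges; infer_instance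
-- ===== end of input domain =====

-- B replaces A's group-then-sort-each-zone-list by: pre-create the zones, sort the key list
-- ONCE, and append each key to both its endpoint zones in that global order (objective: alternative).
-- The dict argument is modelled as an association list; both ports iterate its keys
-- (first components, first occurrence wins) exactly as Python iterates the dict.

-- ===== PORT A =====
-- k.split("->") (separator non-empty, so Python's split never raises by itself)
def pvSplitArrow (k : String) : List String := (PySem.Str.split? k "->").getD []

-- Python's "z1, z2 = l" unpacking: f applied to the two elements; dflt where Python raises ValueError
def pvUnpack2 {α : Type} (l : List String) (f : String → String → α) (dflt : α) : α :=
  match l with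
  | [z1, z2] => f z1 z2
  | _ => dflt

-- the keys of the dict argument, in Python dict order (first occurrence)
def pvKeys (exhanges : List (String × Int)) : List String := PySem.List.dedup (exhanges.map Prod.fst)

def generate_zone_to_exchanges (exhanges : List (String × Int)) : List (String × List String) :=
  let d1 := (pvKeys exhanges).foldl (fun d k =>
    pvUnpack2 (pvSplitArrow k) (fun z1 z2 =>
        -- if zone_key_1 not in d: d[z1] = [k] else d[z1].append(k); then the same for zone_key_2
        let d' := if d.contains z1 then d.insert z1 (d.getD z1 [] ++ [k]) else d.insert z1 [k]
        if d'.contains z2 then d'.insert z2 (d'.getD z2 [] ++ [k]) else d'.insert z2 [k])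
      d   -- Python raises ValueError on the unpacking otherwise; excluded by Pre_
    ) PySem.Dict.empty
  -- 'for z, ex in d.items(): d[z] = sorted(ex)': reassigning an existing key keeps its
  -- position, so this loop is exactly a map over the entries
  d1.items.map (fun p => (p.1, PySem.List.sorted p.2 id))

-- ===== PORT B =====
-- 'zone_key_1, zone_key_2 = k.split("->"); d[zone_key_1] = []; d[zone_key_2] = []'
def pvCreateZones (d : PySem.Dict String (List String)) (k : String) : PySem.Dict String (List String) :=
  pvUnpack2 (pvSplitArrow k) (fun z1 z2 => (d.insert z1 ([] : List String)).insert z2 [])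
    d   -- Python raises ValueError on the unpacking otherwise; excluded by Pre_

-- 'zone_key_1, zone_key_2 = k.split("->"); d[zone_key_1].append(k); d[zone_key_2].append(k)'
def pvAppendZones (d : PySem.Dict String (List String)) (k : String) : PySem.Dict String (List String) :=
  pvUnpack2 (pvSplitArrow k) (fun z1 z2 => (d.modify z1 [] (· ++ [k])).modify z2 [] (· ++ [k]))
    d   -- Python raises ValueError on the unpacking otherwise; excluded by Pre_

def generate_zone_to_exchanges_alt (exhanges : List (String × Int)) : List (String × List String) :=
  -- first pass: create both endpoint zones of every key, in first-appearance order
  let d1 := (pvKeys exhanges).foldl pvCreateZones PySem.Dict.empty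
  -- second pass over the keys sorted once: d[z].append(k) in this order
  let d2 := (PySem.List.sorted (pvKeys exhanges) id).foldl pvAppendZones d1
  d2.items

-- ===== PRECONDITION & SPEC =====
-- Pre_ excludes exactly the inputs where some key does not split on "->" into two parts:
-- there Python A's unpacking 'zone_key_1, zone_key_2 = k.split("->")' raises ValueError.
def Pre_generate_zone_to_exchanges (exhanges : List (String × Int)) : Prop :=
  ∀ p ∈ exhanges, ((PySem.Str.split? p.1 "->").getD []).length = 2
instance (exhanges : List (String × Int)) : Decidable (Pre_generate_zone_to_exchanges exhanges) := by unfold Pre_generate_zone_to_exchanges; infer_instance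

def pvWitness_generate_zone_to_exchanges : (List (String × Int)) := [("a->b", 1), ("b->c", 2)]

def Spec_generate_zone_to_exchanges (exhanges : List (String × Int)) (out : List (String × List String)) : Prop := out = generate_zone_to_exchanges_alt exhanges
instance (exhanges : List (String × Int)) (out : List (String × List String)) : Decidable (Spec_generate_zone_to_exchanges exhanges out) := by unfold Spec_generate_zone_to_exchanges; infer_instance

-- ===== CLAIM (what is proved, stated in full; the proofs are below) =====
def Claim_equal_generate_zone_to_exchanges : Prop := ∀ (exhanges : List (String × Int)), Dom_generate_zone_to_exchanges exhanges → Pre_generate_zone_to_exchanges exhanges → Spec_generate_zone_to_exchanges exhanges (generate_zone_to_exchanges exhanges)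

-- ===== LEMMAS AND PROOFS =====

-- the stream of (endpoint zone, key) pairs emitted by one key
def pvPairs (k : String) : List (String × String) := (pvSplitArrow k).map (fun z => (z, k))

-- A's membership branch is exactly dict.modify (append, default [])
lemma pvA_branch (d : PySem.Dict String (List String)) (z k : String) :
    (if d.contains z then d.insert z (d.getD z [] ++ [k]) else d.insert z [k])
      = d.modify z [] (· ++ [k]) := by
  unfold PySem.Dict.modify
  by_cases h : d.contains z
  · simp [h]
  · have hg : d.get? z = none := (PySem.Dict.get?_eq_none_iff_contains d z).mpr (by simpa using h)
    simp [h, PySem.Dict.getD, hg]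

-- under Pre_, A's first loop is the modify-fold over the flattened pair stream
lemma pvA_d1_eq (exhanges : List (String × Int))
    (hPre : Pre_generate_zone_to_exchanges exhanges) :
    ((pvKeys exhanges).foldl (fun d k =>
      pvUnpack2 (pvSplitArrow k) (fun z1 z2 =>
          let d' := if d.contains z1 then d.insert z1 (d.getD z1 [] ++ [k]) else d.insert z1 [k]
          if d'.contains z2 then d'.insert z2 (d'.getD z2 [] ++ [k]) else d'.insert z2 [k])
        d) PySem.Dict.empty)
      = ((pvKeys exhanges).flatMap pvPairs).foldl
          (fun d p => d.modify p.1 [] (· ++ [p.2])) PySem.Dict.empty := by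
  rw [List.foldl_flatMap]
  apply PySem.List.foldl_congr_mem
  intro d k hk
  obtain ⟨p, hp, rfl⟩ := List.mem_map.mp ((PySem.List.mem_dedup _ _).mp hk)
  obtain ⟨z1, z2, hz⟩ := List.length_eq_two.mp (hPre p hp)
  have hz' : pvSplitArrow p.1 = [z1, z2] := hz
  rw [hz']
  simp only [pvUnpack2, pvPairs, hz', List.map_cons, List.map_nil, List.foldl_cons, List.foldl_nil]
  rw [pvA_branch, pvA_branch]

-- the value of B's first-pass dict is [] at every key
lemma pvB_d1_getD (zl : List String) (d : PySem.Dict String (List String))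
    (h : ∀ z, d.getD z [] = []) (z : String) :
    (zl.foldl (fun d z => d.insert z ([] : List String)) d).getD z [] = [] := by
  induction zl generalizing d with
  | nil => exact h z
  | cons a l ih =>
      refine ih _ (fun z' => ?_)
      rw [PySem.Dict.getD_insert]
      split_ifs with hz
      · rfl
      · exact h z'

-- Set.update by elements already present is the identity
lemma pvSet_update_of_subset (s : PySem.Set String) (xs : List String)
    (h : ∀ x ∈ xs, x ∈ s) : PySem.Set.update s xs = s := by
  induction xs generalizing s with
  | nil => rfl
  | cons a l ih =>
      have ha : PySem.Set.add s a = s := by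
        have hm : a ∈ s := h a (by simp)
        simp [PySem.Set.add, hm]
      show PySem.Set.update (PySem.Set.add s a) l = s
      rw [ha]
      exact ih s (fun x hx => h x (by simp [hx]))

-- a flatMap whose pieces only contain their own index key is sorted when the index list is
lemma pvPairwise_flatMap (l : List String) (f : String → List String)
    (hl : l.Pairwise (· ≤ ·)) (hf : ∀ k, ∀ y ∈ f k, y = k) :
    (l.flatMap f).Pairwise (· ≤ ·) := by
  induction l with
  | nil => simp
  | cons a l ih =>
      rw [List.flatMap_cons, List.pairwise_append]
      refine ⟨List.pairwise_of_forall_mem_list (fun x hx y hy => ?_),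
              ih (List.pairwise_cons.mp hl).2, fun x hx y hy => ?_⟩
      · rw [hf a x hx, hf a y hy]
      · obtain ⟨b, hb, hyb⟩ := List.mem_flatMap.mp hy
        rw [hf a x hx, hf b y hyb]
        exact (List.pairwise_cons.mp hl).1 b hb

-- the per-zone list of B's second pass equals the sorted per-zone list of A
lemma pvZone_sorted (K : List String) (z : String) :
    PySem.List.sorted (((K.flatMap pvPairs).filter (fun p => p.1 == z)).map (·.2)) id
      = (((PySem.List.sorted K id).flatMap pvPairs).filter (fun p => p.1 == z)).map (·.2) := by
  have hmem : ∀ k : String, ∀ y ∈ (((pvPairs k).filter (fun p => p.1 == z)).map (·.2)), y = k := by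
    intro k y hy
    obtain ⟨q, hq, rfl⟩ := List.mem_map.mp hy
    obtain ⟨z', -, rfl⟩ := List.mem_map.mp (List.mem_filter.mp hq).1
    rfl
  have hpermK : (PySem.List.sorted K id).Perm K := PySem.List.sorted_perm K id false
  have hperm :
      ((((PySem.List.sorted K id).flatMap pvPairs).filter (fun p => p.1 == z)).map (·.2)).Perm
        (((K.flatMap pvPairs).filter (fun p => p.1 == z)).map (·.2)) :=
    ((hpermK.flatMap (fun a _ => List.Perm.refl _)).filter _).map _
  refine List.Perm.eq_of_pairwise (le := (· ≤ ·))
      (fun a b _ _ h1 h2 => le_antisymm h1 h2) ?_ ?_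
      ((PySem.List.sorted_perm _ id false).trans hperm.symm)
  · have := PySem.List.sorted_pairwise
      (((K.flatMap pvPairs).filter (fun p => p.1 == z)).map (·.2)) id
    simpa using this
  · rw [List.filter_flatMap, List.map_flatMap]
    refine pvPairwise_flatMap _ _ ?_ hmem
    have := PySem.List.sorted_pairwise K id
    simpa using this

-- under Pre_, B's two loops flattened to folds over the zone / (zone, key) pair streams
lemma pvB_eq (exhanges : List (String × Int))
    (hPre : Pre_generate_zone_to_exchanges exhanges) :
    generate_zone_to_exchanges_alt exhanges
      = (((PySem.List.sorted (pvKeys exhanges) id).flatMap pvPairs).foldl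
          (fun d p => d.modify p.1 [] (· ++ [p.2]))
          (((pvKeys exhanges).flatMap pvSplitArrow).foldl
            (fun d z => d.insert z ([] : List String)) PySem.Dict.empty)).items := by
  unfold generate_zone_to_exchanges_alt
  rw [List.foldl_flatMap, List.foldl_flatMap]
  refine congrArg PySem.Dict.items ?_
  have h1 : ((pvKeys exhanges).foldl pvCreateZones PySem.Dict.empty)
      = ((pvKeys exhanges).foldl (fun acc x =>
          (pvSplitArrow x).foldl (fun d z => d.insert z ([] : List String)) acc)
          PySem.Dict.empty) := by
    apply PySem.List.foldl_congr_mem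
    intro d k hk
    obtain ⟨p, hp, rfl⟩ := List.mem_map.mp ((PySem.List.mem_dedup _ _).mp hk)
    obtain ⟨z1, z2, hz⟩ := List.length_eq_two.mp (hPre p hp)
    have hz' : pvSplitArrow p.1 = [z1, z2] := hz
    rw [pvCreateZones, hz']
    rfl
  rw [h1]
  apply PySem.List.foldl_congr_mem
  intro d k hk
  have hkK : k ∈ pvKeys exhanges := (PySem.List.sorted_perm _ id false).mem_iff.mp hk
  obtain ⟨p, hp, rfl⟩ := List.mem_map.mp ((PySem.List.mem_dedup _ _).mp hkK)
  obtain ⟨z1, z2, hz⟩ := List.length_eq_two.mp (hPre p hp)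
  have hz' : pvSplitArrow p.1 = [z1, z2] := hz
  rw [pvAppendZones, hz']
  simp only [pvUnpack2, pvPairs, hz', List.map_cons, List.map_nil, List.foldl_cons, List.foldl_nil]

-- ===== VERDICT (by name: the statement is the Claim_ definition above) =====
theorem generate_zone_to_exchanges_spec : Claim_equal_generate_zone_to_exchanges := by
  intro ex _ hPre
  show generate_zone_to_exchanges ex = generate_zone_to_exchanges_alt ex
  unfold generate_zone_to_exchanges
  rw [pvA_d1_eq ex hPre, pvB_eq ex hPre]
  show List.map (fun p => (p.1, PySem.List.sorted p.2 id))
      ((((pvKeys ex).flatMap pvPairs).foldl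
        (fun d p => d.modify p.1 [] (· ++ [p.2])) PySem.Dict.empty)).items
    = _
  have hmapfst : ∀ (l : List String),
      (l.flatMap pvPairs).map Prod.fst = l.flatMap pvSplitArrow := by
    intro l
    simp [pvPairs, List.map_flatMap, List.map_map, Function.comp_def]
  -- keys of A's dict
  have hKA : ((((pvKeys ex).flatMap pvPairs).foldl
        (fun d p => d.modify p.1 [] (· ++ [p.2])) PySem.Dict.empty)).keys
      = PySem.Set.update [] ((pvKeys ex).flatMap pvSplitArrow) := by
    have h := PySem.Dict.keys_foldl_modify_key ((pvKeys ex).flatMap pvPairs) Prod.fst []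
      (fun _ p => (· ++ [p.2])) PySem.Dict.empty
    rwa [PySem.Dict.keys_empty, hmapfst] at h
  -- keys of B's first-pass dict
  have hKB1 : ((((pvKeys ex).flatMap pvSplitArrow).foldl
        (fun d z => d.insert z ([] : List String)) PySem.Dict.empty)).keys
      = PySem.Set.update [] ((pvKeys ex).flatMap pvSplitArrow) := by
    have h := PySem.Dict.keys_foldl_insert ((pvKeys ex).flatMap pvSplitArrow)
      (fun _ _ => ([] : List String)) PySem.Dict.empty
    rwa [PySem.Dict.keys_empty] at h
  -- keys of B's final dict: the second pass adds no new key
  have hKB2 : ((((PySem.List.sorted (pvKeys ex) id).flatMap pvPairs).foldl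
        (fun d p => d.modify p.1 [] (· ++ [p.2]))
        (((pvKeys ex).flatMap pvSplitArrow).foldl
          (fun d z => d.insert z ([] : List String)) PySem.Dict.empty))).keys
      = PySem.Set.update [] ((pvKeys ex).flatMap pvSplitArrow) := by
    have h := PySem.Dict.keys_foldl_modify_key ((PySem.List.sorted (pvKeys ex) id).flatMap pvPairs)
      Prod.fst [] (fun _ p => (· ++ [p.2]))
      (((pvKeys ex).flatMap pvSplitArrow).foldl
        (fun d z => d.insert z ([] : List String)) PySem.Dict.empty)
    rw [hKB1, hmapfst] at h
    rw [h]
    refine pvSet_update_of_subset _ _ (fun x hx => ?_)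
    obtain ⟨k, hk, hxk⟩ := List.mem_flatMap.mp hx
    have hkK : k ∈ pvKeys ex := (PySem.List.sorted_perm (pvKeys ex) id false).mem_iff.mp hk
    exact (PySem.Set.mem_update _ _ _).mpr (Or.inr (List.mem_flatMap.mpr ⟨k, hkK, hxk⟩))
  -- values
  have hA : ∀ z, ((((pvKeys ex).flatMap pvPairs).foldl
        (fun d p => d.modify p.1 [] (· ++ [p.2])) PySem.Dict.empty)).getD z []
      = (((pvKeys ex).flatMap pvPairs).filter (fun p => p.1 == z)).map (·.2) := by
    intro z
    have h := PySem.Dict.getD_foldl_modify_append ((pvKeys ex).flatMap pvPairs)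
      PySem.Dict.empty z
    simpa [PySem.Dict.getD, PySem.Dict.get?_empty] using h
  have hB1 : ∀ z, ((((pvKeys ex).flatMap pvSplitArrow).foldl
        (fun d z => d.insert z ([] : List String)) PySem.Dict.empty)).getD z [] = [] := by
    intro z
    exact pvB_d1_getD _ _ (fun z' => by simp [PySem.Dict.getD, PySem.Dict.get?_empty]) z
  have hB : ∀ z, ((((PySem.List.sorted (pvKeys ex) id).flatMap pvPairs).foldl
        (fun d p => d.modify p.1 [] (· ++ [p.2]))
        (((pvKeys ex).flatMap pvSplitArrow).foldl
          (fun d z => d.insert z ([] : List String)) PySem.Dict.empty))).getD z []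
      = (((PySem.List.sorted (pvKeys ex) id).flatMap pvPairs).filter (fun p => p.1 == z)).map (·.2) := by
    intro z
    have h := PySem.Dict.getD_foldl_modify_append ((PySem.List.sorted (pvKeys ex) id).flatMap pvPairs)
      (((pvKeys ex).flatMap pvSplitArrow).foldl
        (fun d z => d.insert z ([] : List String)) PySem.Dict.empty) z
    simpa [hB1 z] using h
  -- nodup keys
  have hNA : ((((pvKeys ex).flatMap pvPairs).foldl
        (fun d p => d.modify p.1 [] (· ++ [p.2])) PySem.Dict.empty)).keys.Nodup :=
    PySem.Dict.nodup_keys_foldl_modify_key _ Prod.fst [] (fun _ p => (· ++ [p.2]))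
      PySem.Dict.empty (by rw [PySem.Dict.keys_empty]; exact List.nodup_nil)
  have hNB : ((((PySem.List.sorted (pvKeys ex) id).flatMap pvPairs).foldl
        (fun d p => d.modify p.1 [] (· ++ [p.2]))
        (((pvKeys ex).flatMap pvSplitArrow).foldl
          (fun d z => d.insert z ([] : List String)) PySem.Dict.empty))).keys.Nodup :=
    PySem.Dict.nodup_keys_foldl_modify_key _ Prod.fst [] (fun _ p => (· ++ [p.2])) _
      (PySem.Dict.nodup_keys_foldl_insert _ (fun _ _ => ([] : List String))
        PySem.Dict.empty (by rw [PySem.Dict.keys_empty]; exact List.nodup_nil))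
  -- compare the two item lists entrywise
  rw [PySem.Dict.items_eq_map_keys _ hNA ([] : List String),
      PySem.Dict.items_eq_map_keys _ hNB ([] : List String),
      hKA, hKB2, List.map_map]
  refine List.map_congr_left (fun z _ => ?_)
  simp only [Function.comp]
  rw [hA, hB, pvZone_sorted]
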